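-- pv_equiv track=rewrite | github.com/chaichontat/oligocheck | primers.py | umi_generator
-- ===== SOURCE A (Python) =====
-- from itertools import product
--
-- def umi_generator(template: str, seed: int = 42):
--     mapping = {
--         "A": "A",
--         "T": "T",
--         "G": "G",
--         "C": "C",
--         "N": "ATGC",
--         "W": "AT",
--         "S": "GC",
--         "M": "AC",
--         "K": "GT",
--         "R": "AG",
--         "Y": "CT",
--         "B": "CGT",
--         "D": "AGT",
--         "H": "ACT",
--         "V": "ACG",
--     }
--     iters = [mapping[x] for x in template]
--     return ["".join(x) for x in product(*iters)]
-- ===== SOURCE B (Python) =====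
-- def umi_generator(template: str, seed: int = 42):
--     mapping = {
--         "A": "A",
--         "T": "T",
--         "G": "G",
--         "C": "C",
--         "N": "ATGC",
--         "W": "AT",
--         "S": "GC",
--         "M": "AC",
--         "K": "GT",
--         "R": "AG",
--         "Y": "CT",
--         "B": "CGT",
--         "D": "AGT",
--         "H": "ACT",
--         "V": "ACG",
--     }
--     choices = [mapping[x] for x in template]
--     total = 1
--     for c in choices:
--         total *= len(c)
--     out = []
--     for i in range(total):
--         digits = []
--         r = i
--         for c in reversed(choices):
--             r, d = divmod(r, len(c))
--             digits.append(c[d])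
--         out.append("".join(reversed(digits)))
--     return out
-- ===== Notes on version B (the rewrite author's own statement) =====
-- stated objective: alternative
-- what changed: Replaces itertools.product's recursive tuple expansion with mixed-radix arithmetic: compute the total count as the product of the choice-set sizes, then decode each index 0..total-1 into its string by repeated divmod, so no intermediate tuple lists are ever built.
import Mathlib
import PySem

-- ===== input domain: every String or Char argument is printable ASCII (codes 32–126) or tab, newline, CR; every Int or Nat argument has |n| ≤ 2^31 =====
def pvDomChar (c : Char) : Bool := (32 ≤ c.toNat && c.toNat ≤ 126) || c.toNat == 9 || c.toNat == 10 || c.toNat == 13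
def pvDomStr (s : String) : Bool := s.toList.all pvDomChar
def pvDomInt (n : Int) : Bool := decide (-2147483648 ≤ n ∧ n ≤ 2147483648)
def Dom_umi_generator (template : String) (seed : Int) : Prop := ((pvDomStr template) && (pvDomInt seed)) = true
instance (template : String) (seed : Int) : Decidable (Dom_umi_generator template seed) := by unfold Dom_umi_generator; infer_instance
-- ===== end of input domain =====

-- B replaces itertools.product's recursive tuple expansion by mixed-radix arithmetic:
-- count i from 0 to the product of the choice-set sizes and decode each i into its
-- digit string by repeated divmod; same output, similar cost (objective: alternative).

-- the IUPAC mapping dict, shared by both Pythons; returns none where the dict raises KeyError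
def iupac (c : Char) : Option String :=
  PySem.Dict.get? (PySem.Dict.ofList
    [('A', "A"), ('T', "T"), ('G', "G"), ('C', "C"), ('N', "ATGC"), ('W', "AT"),
     ('S', "GC"), ('M', "AC"), ('K', "GT"), ('R', "AG"), ('Y', "CT"), ('B', "CGT"),
     ('D', "AGT"), ('H', "ACT"), ('V', "ACG")]) c

-- ===== PORT A =====
-- itertools.product(*iters): last axis varies fastest
def pyProduct : List (List Char) → List (List Char)
  | [] => [[]]
  | l :: ls => l.flatMap (fun c => (pyProduct ls).map (fun t => c :: t))

-- KeyError (iupac = none) is excluded by Pre_; getD "" is never reached there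
def umi_generator (template : String) (seed : Int) : List String :=
  let iters := template.toList.map (fun x => ((iupac x).getD "").toList)
  (pyProduct iters).map (fun x => String.ofList x)   -- "".join(x)

-- ===== PORT B =====
-- divmod(r, len(c)) with r ≥ 0: Nat division/mod are exact here; c[d] has 0 ≤ d < len(c)
-- whenever c is nonempty (guaranteed under Pre_), so getD is exact there.
def umi_generator_alt (template : String) (seed : Int) : List String :=
  let choices := template.toList.map (fun x => ((iupac x).getD "").toList)
  let total := choices.foldl (fun t c => t * c.length) 1
  (List.range total).map (fun i =>
    let s := choices.reverse.foldl
      (fun (p : Nat × List Char) c => (p.1 / c.length, p.2 ++ [c.getD (p.1 % c.length) ' ']))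
      (i, [])
    String.ofList s.2.reverse)   -- "".join(reversed(digits))

-- ===== PRECONDITION & SPEC =====
-- Pre_ excludes exactly the templates containing a character outside the IUPAC dict,
-- on which both Pythons raise KeyError.
def Pre_umi_generator (template : String) (seed : Int) : Prop :=
  (template.toList.all (fun c => (iupac c).isSome)) = true

instance (template : String) (seed : Int) : Decidable (Pre_umi_generator template seed) := by
  unfold Pre_umi_generator; infer_instance

def pvWitness_umi_generator : String × Int := ("NWT", 42)

def Spec_umi_generator (template : String) (seed : Int) (out : List String) : Prop := out = umi_generator_alt template seed
instance (template : String) (seed : Int) (out : List String) : Decidable (Spec_umi_generator template seed out) := by unfold Spec_umi_generator; infer_instance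

-- ===== CLAIM (what is proved, stated in full; the proofs are below) =====
def Claim_equal_umi_generator : Prop := ∀ (template : String) (seed : Int), Dom_umi_generator template seed → Pre_umi_generator template seed → Spec_umi_generator template seed (umi_generator template seed)

-- ===== LEMMAS AND PROOFS =====

-- product of the axis sizes
def prodLen (ls : List (List Char)) : Nat := (ls.map List.length).prod

-- mixed-radix decoding of index i into one tuple of pyProduct ls
def dec : List (List Char) → Nat → List Char
  | [], _ => []
  | l :: ls, i => l.getD (i / prodLen ls) ' ' :: dec ls (i % prodLen ls)

theorem foldl_mul_len (ls : List (List Char)) (t : Nat) :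
    ls.foldl (fun t c => t * c.length) t = t * prodLen ls := by
  induction ls generalizing t with
  | nil => simp [prodLen]
  | cons l ls ih => simp [List.foldl_cons, ih, prodLen, List.prod_cons]; ring

theorem range_mul_flatMap (a b : Nat) :
    List.range (a * b) = (List.range a).flatMap (fun q => (List.range b).map (fun r => q * b + r)) := by
  induction a with
  | zero => simp
  | succ a ih =>
      rw [Nat.succ_mul, List.range_add, List.range_succ, List.flatMap_append, ← ih]
      simp [Nat.mul_comm]

theorem flatMap_eq_range (l : List Char) (g : Char → List (List Char)) :
    l.flatMap g = (List.range l.length).flatMap (fun q => g (l.getD q ' ')) := by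
  induction l with
  | nil => simp
  | cons c l ih =>
      rw [List.flatMap_cons, List.length_cons, List.range_succ_eq_map,
        List.flatMap_cons, List.flatMap_map]
      simp only [List.getD_cons_zero, List.getD_cons_succ]
      rw [ih]

theorem pyProduct_eq_dec (ls : List (List Char)) :
    pyProduct ls = (List.range (prodLen ls)).map (dec ls) := by
  induction ls with
  | nil => rfl
  | cons l ls ih =>
      show l.flatMap (fun c => (pyProduct ls).map (fun t => c :: t)) = _
      rw [ih]
      have hP : prodLen (l :: ls) = l.length * prodLen ls := by
        simp [prodLen, List.prod_cons]
      rw [hP, range_mul_flatMap, flatMap_eq_range l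
        (fun c => ((List.range (prodLen ls)).map (dec ls)).map (fun t => c :: t)),
        List.map_flatMap]
      apply List.flatMap_congr
      intro q _
      rw [List.map_map, List.map_map]
      apply List.map_congr_left
      intro r hr
      rw [List.mem_range] at hr
      show l.getD q ' ' :: dec ls r = dec (l :: ls) (q * prodLen ls + r)
      have hpos : 0 < prodLen ls := Nat.lt_of_le_of_lt (Nat.zero_le r) hr
      have h1 : (q * prodLen ls + r) / prodLen ls = q := by
        rw [Nat.mul_comm q, Nat.mul_add_div hpos, Nat.div_eq_of_lt hr, Nat.add_zero]
      have h2 : (q * prodLen ls + r) % prodLen ls = r := by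
        rw [Nat.add_mod, Nat.mul_mod_left, Nat.zero_add, Nat.mod_mod_of_dvd r (dvd_refl _),
          Nat.mod_eq_of_lt hr]
      simp [dec, h1, h2]

theorem foldl_divmod_eq_dec (ls : List (List Char)) (i : Nat) (acc : List Char) :
    ls.reverse.foldl
      (fun (p : Nat × List Char) c => (p.1 / c.length, p.2 ++ [c.getD (p.1 % c.length) ' ']))
      (i, acc)
    = (i / prodLen ls, acc ++ (dec ls (i % prodLen ls)).reverse) := by
  induction ls generalizing i acc with
  | nil => simp [prodLen, dec]
  | cons l ls ih =>
      rw [List.reverse_cons, List.foldl_append, ih, List.foldl_cons, List.foldl_nil]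
      have hP : prodLen (l :: ls) = l.length * prodLen ls := by
        simp [prodLen, List.prod_cons]
      have h1 : i / prodLen ls / l.length = i / prodLen (l :: ls) := by
        rw [Nat.div_div_eq_div_mul, hP, Nat.mul_comm]
      have h2 : i / prodLen ls % l.length = i % prodLen (l :: ls) / prodLen ls := by
        rw [hP, Nat.mul_comm, Nat.mod_mul_right_div_self]
      have h3 : i % prodLen ls = i % prodLen (l :: ls) % prodLen ls := by
        rw [hP, Nat.mod_mod_of_dvd _ ⟨l.length, Nat.mul_comm _ _⟩]
      simp only [dec, List.reverse_cons, ← List.append_assoc]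
      rw [h1, h2, h3]

-- ===== VERDICT (by name: the statement is the Claim_ definition above) =====
theorem umi_generator_spec : Claim_equal_umi_generator := by
  intro template seed _ _
  unfold Spec_umi_generator umi_generator umi_generator_alt
  dsimp only
  rw [foldl_mul_len, Nat.one_mul, pyProduct_eq_dec, List.map_map]
  apply List.map_congr_left
  intro i hi
  rw [List.mem_range] at hi
  simp only [Function.comp, foldl_divmod_eq_dec, Nat.mod_eq_of_lt hi,
    List.nil_append, List.reverse_reverse]
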